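-- pv_equiv track=rewrite | github.com/MrBrantCode/unitest_baseline | mut_generate/mist_train_taco/taco_1664/solution.py | count_equal_mod_values
-- ===== SOURCE A (Python) =====
-- def count_equal_mod_values(arr, n):
--     if n == 1:
--         return -1
--
--     def is_valid_k(k):
--         mod_value = arr[0] % k
--         for num in arr:
--             if num % k != mod_value:
--                 return False
--         return True
--
--     max_val = max(arr)
--     result = 0
--
--     for k in range(1, max_val + 1):
--         if is_valid_k(k):
--             result += 1
--
--     return result if result > 0 else -1
-- ===== SOURCE B (Python) =====
-- def _gcd(a, b):
--     while b > 0: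
--         a, b = b, a % b
--     return a
--
-- def count_equal_mod_values(arr, n):
--     if n == 1:
--         return -1
--     a0 = arr[0]
--     m = a0
--     g = 0
--     for x in arr:
--         if x > m:
--             m = x
--         g = _gcd(g, abs(x - a0))
--     if g == 0:
--         return m if m >= 1 else -1
--     cnt = 0
--     for k in range(1, m + 1):
--         if g % k == 0:
--             cnt += 1
--     return cnt if cnt > 0 else -1
-- ===== Notes on version B (the rewrite author's own statement) =====
-- stated objective: faster
-- what changed: Instead of testing every k in 1..max(arr) against the whole array, B computes the gcd g of all differences to arr[0] in one pass (tracking max simultaneously) and then counts divisors of g up to max(arr) with a single modulus test per k; the all-equal case (g=0) is answered in closed form.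
import Mathlib
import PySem

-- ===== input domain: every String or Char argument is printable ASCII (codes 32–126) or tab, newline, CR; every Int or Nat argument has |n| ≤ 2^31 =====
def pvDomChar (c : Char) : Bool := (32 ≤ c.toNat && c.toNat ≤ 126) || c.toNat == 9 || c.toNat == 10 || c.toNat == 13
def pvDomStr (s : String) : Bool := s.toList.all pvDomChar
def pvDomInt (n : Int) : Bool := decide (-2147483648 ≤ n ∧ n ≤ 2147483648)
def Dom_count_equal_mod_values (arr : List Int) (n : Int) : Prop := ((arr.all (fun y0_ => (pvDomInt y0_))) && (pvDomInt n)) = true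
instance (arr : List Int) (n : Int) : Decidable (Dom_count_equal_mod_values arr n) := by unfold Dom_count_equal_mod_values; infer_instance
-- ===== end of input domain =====

-- B replaces A's scan of the whole array for every candidate k by a one-pass gcd of
-- differences plus a single divisibility test per k (objective: faster; measured).

-- ===== PORT A =====
def pvIsValidLoop (l : List Int) (mv k : Int) : Bool :=
  match l with
  | [] => true
  | x :: xs => if PySem.Int.mod x k != mv then false else pvIsValidLoop xs mv k

def pvIsValidK (arr : List Int) (k : Int) : Bool :=
  pvIsValidLoop arr (PySem.Int.mod ((PySem.List.pyGet? arr 0).getD 0) k) k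

def count_equal_mod_values (arr : List Int) (n : Int) : Int :=
  if n == 1 then -1
  else
    let maxVal := (PySem.List.max? arr (fun y => y)).getD 0
    let result := (PySem.List.pyRange 1 (maxVal + 1) 1).foldl
      (fun r k => if pvIsValidK arr k then r + 1 else r) 0
    if result > 0 then result else -1

-- ===== PORT B =====
def pvGcd (a b : Int) : Int :=
  if 0 < b then pvGcd b (PySem.Int.mod a b) else a
termination_by b.toNat
decreasing_by
  rename_i h
  have h1 : PySem.Int.mod a b = a % b := PySem.Int.mod_eq_emod_of_pos h
  have h3 : a % b < b := Int.emod_lt_of_pos a h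
  omega

def count_equal_mod_values_alt (arr : List Int) (n : Int) : Int :=
  if n == 1 then -1
  else
    let a0 := (PySem.List.pyGet? arr 0).getD 0
    let mg := arr.foldl (fun (p : Int × Int) x =>
      (if x > p.1 then x else p.1, pvGcd p.2 |x - a0|)) (a0, 0)
    if mg.2 == 0 then (if mg.1 ≥ 1 then mg.1 else -1)
    else
      let cnt := (PySem.List.pyRange 1 (mg.1 + 1) 1).foldl
        (fun c k => if PySem.Int.mod mg.2 k == 0 then c + 1 else c) 0
      if cnt > 0 then cnt else -1

-- ===== PRECONDITION & SPEC =====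
-- Pre_ excludes only arr = [] with n ≠ 1, where A raises ValueError (max of empty list).
def Pre_count_equal_mod_values (arr : List Int) (n : Int) : Prop := n = 1 ∨ arr ≠ []
instance (arr : List Int) (n : Int) : Decidable (Pre_count_equal_mod_values arr n) := by
  unfold Pre_count_equal_mod_values; infer_instance

def pvWitness_count_equal_mod_values : List Int × Int := ([2, 5, 8], 3)

def Spec_count_equal_mod_values (arr : List Int) (n : Int) (out : Int) : Prop := out = count_equal_mod_values_alt arr n
instance (arr : List Int) (n : Int) (out : Int) : Decidable (Spec_count_equal_mod_values arr n out) := by unfold Spec_count_equal_mod_values; infer_instance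

-- ===== CLAIM (what is proved, stated in full; the proofs are below) =====
def Claim_equal_count_equal_mod_values : Prop := ∀ (arr : List Int) (n : Int), Dom_count_equal_mod_values arr n → Pre_count_equal_mod_values arr n → Spec_count_equal_mod_values arr n (count_equal_mod_values arr n)

-- ===== LEMMAS AND PROOFS =====

-- pvGcd computes Int.gcd on nonnegative inputs
theorem pvGcd_eq_gcd : ∀ (a b : Int), 0 ≤ a → 0 ≤ b → pvGcd a b = (Int.gcd a b : Int) := by
  intro a b
  induction a, b using pvGcd.induct with
  | case1 a b h ih =>
    intro _ _
    rw [pvGcd]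
    rw [if_pos h]
    have hm : PySem.Int.mod a b = a % b := PySem.Int.mod_eq_emod_of_pos h
    rw [hm] at ih ⊢
    rw [ih (le_of_lt h) (Int.emod_nonneg a (by omega))]
    congr 1
    rw [Int.emod_def]
    have : a - b * (a / b) = a + b * (-(a / b)) := by ring
    rw [this, Int.gcd_add_mul_left_right, Int.gcd_comm]
  | case2 a b h =>
    intro ha hb
    rw [pvGcd, if_neg h]
    have hb0 : b = 0 := by omega
    subst hb0
    simp [Int.gcd, Int.natAbs_of_nonneg ha]

-- splitting B's pair fold
theorem foldl_pair_split (l : List Int) (a0 : Int) (p : Int × Int) :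
    l.foldl (fun (p : Int × Int) x =>
      (if x > p.1 then x else p.1, pvGcd p.2 |x - a0|)) p =
    (l.foldl (fun m x => if x > m then x else m) p.1,
     l.foldl (fun g x => pvGcd g |x - a0|) p.2) := by
  induction l generalizing p with
  | nil => rfl
  | cons y t ih => simp [List.foldl, ih]

-- divisibility characterisation of the gcd fold
theorem foldl_gcd_dvd (l : List Int) (a0 g0 k : Int) (hg : 0 ≤ g0) :
    0 ≤ l.foldl (fun g x => pvGcd g |x - a0|) g0 ∧
    (k ∣ l.foldl (fun g x => pvGcd g |x - a0|) g0 ↔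
      k ∣ g0 ∧ ∀ x ∈ l, k ∣ (x - a0)) := by
  induction l generalizing g0 with
  | nil => exact ⟨hg, by simp⟩
  | cons y t ih =>
    simp only [List.foldl_cons]
    have habs : (0:Int) ≤ |y - a0| := abs_nonneg _
    have hstep : pvGcd g0 |y - a0| = (Int.gcd g0 (y - a0) : Int) := by
      rw [pvGcd_eq_gcd g0 _ hg habs]
      simp [Int.gcd, Int.natAbs_abs]
    have hnn : (0:Int) ≤ pvGcd g0 |y - a0| := by
      rw [hstep]; exact Int.natCast_nonneg _
    obtain ⟨h1, h2⟩ := ih (pvGcd g0 |y - a0|) hnn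
    refine ⟨h1, ?_⟩
    rw [h2, hstep, Int.dvd_coe_gcd_iff]
    simp only [List.forall_mem_cons]
    tauto

-- A's inner loop
theorem pvIsValidLoop_iff (l : List Int) (mv k : Int) :
    pvIsValidLoop l mv k = true ↔ ∀ x ∈ l, PySem.Int.mod x k = mv := by
  induction l with
  | nil => simp [pvIsValidLoop]
  | cons y t ih => by_cases h : PySem.Int.mod y k = mv <;> simp [pvIsValidLoop, h, ih]

-- counting fold = countP
theorem foldl_count (l : List Int) (c : Int → Bool) (r : Int) :
    l.foldl (fun r k => if c k then r + 1 else r) r = r + (l.countP c : Int) := by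
  induction l generalizing r with
  | nil => simp
  | cons y t ih => by_cases h : c y <;> simp [List.foldl, h, ih] <;> ring

-- the update in B's running max is Int.max
theorem foldl_if_max (l : List Int) (m : Int) :
    l.foldl (fun m x => if x > m then x else m) m = l.foldl max m := by
  have h : (fun (m x : Int) => if x > m then x else m) = max := by
    funext m x; rw [max_def]; split_ifs <;> omega
  rw [h]

-- the heart: A and B agree on every nonempty list when n ≠ 1
theorem pv_main_cons (a0 n : Int) (rest : List Int) (hn : ¬ n = 1) :
    count_equal_mod_values (a0 :: rest) n = count_equal_mod_values_alt (a0 :: rest) n := by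
  have hbeq : (n == 1) = false := by simp [hn]
  have hget : (PySem.List.pyGet? (a0 :: rest) 0).getD 0 = a0 := by
    simp [PySem.List.pyGet?, PySem.List.pyIdx?]
  have hGdvd : ∀ k : Int, k ∣ (a0 :: rest).foldl (fun g x => pvGcd g |x - a0|) 0 ↔
      ∀ x ∈ a0 :: rest, k ∣ (x - a0) := by
    intro k
    have h := (foldl_gcd_dvd (a0 :: rest) a0 0 k le_rfl).2
    simpa using h
  simp only [count_equal_mod_values, count_equal_mod_values_alt, hbeq, Bool.false_eq_true,
    if_false, hget, foldl_pair_split]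
  have hmax : (PySem.List.max? (a0 :: rest) fun y => y).getD 0 = rest.foldl max a0 := by
    rw [PySem.List.max?_id_cons]; rfl
  have hfm : List.foldl (fun m x => if x > m then x else m) a0 (a0 :: rest) = rest.foldl max a0 := by
    simp only [List.foldl_cons, ite_self]
    exact foldl_if_max rest a0
  rw [hmax, hfm]
  set M := rest.foldl max a0 with hM
  set G := List.foldl (fun g x => pvGcd g |x - a0|) 0 (a0 :: rest) with hGdef
  have hpoint : ∀ k ∈ PySem.List.pyRange 1 (M + 1) 1,
      pvIsValidK (a0 :: rest) k = (PySem.Int.mod G k == 0) := by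
    intro k hk
    have hk1 : 1 ≤ k := (PySem.List.mem_pyRange_one.mp hk).1
    have hmid : ∀ x : Int, PySem.Int.mod x k = PySem.Int.mod a0 k ↔ k ∣ (x - a0) := by
      intro x
      rw [PySem.Int.mod_eq_emod_of_pos (by omega), PySem.Int.mod_eq_emod_of_pos (by omega),
          Int.emod_eq_emod_iff_emod_sub_eq_zero, EuclideanDomain.mod_eq_zero]
    rw [Bool.eq_iff_iff, beq_iff_eq, PySem.Int.mod_eq_zero_iff_dvd, hGdvd k]
    unfold pvIsValidK
    rw [hget, pvIsValidLoop_iff]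
    exact forall₂_congr fun x _ => hmid x
  have hcnt : List.foldl (fun r k => if pvIsValidK (a0 :: rest) k = true then r + 1 else r) (0 : Int)
        (PySem.List.pyRange 1 (M + 1) 1) =
      List.foldl (fun c k => if (PySem.Int.mod G k == 0) = true then c + 1 else c) (0 : Int)
        (PySem.List.pyRange 1 (M + 1) 1) :=
    by
    apply PySem.List.foldl_congr_mem
    intro acc x hx
    rw [hpoint x hx]
  simp only [hcnt]
  by_cases hG0 : G = 0
  · have hall : ∀ x ∈ a0 :: rest, x = a0 := by
      intro x hx
      have h0 : (0 : Int) ∣ G := by rw [hG0]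
      have := zero_dvd_iff.mp ((hGdvd 0).mp h0 x hx)
      omega
    have hMa : M = a0 := by
      rcases PySem.List.foldl_max_mem rest a0 with h | h
      · exact h
      · exact hall _ (List.mem_cons_of_mem _ h)
    have htrue : ∀ k ∈ PySem.List.pyRange 1 (M + 1) 1,
        (fun k => PySem.Int.mod G k == 0) k = true := by
      intro k _
      rw [beq_iff_eq, PySem.Int.mod_eq_zero_iff_dvd, hG0]
      exact dvd_zero k
    rw [foldl_count]
    rw [List.countP_eq_length.mpr htrue, PySem.List.length_pyRange_one]
    have hGb : (G == 0) = true := by simp [hG0]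
    rw [hGb, if_pos rfl]
    split_ifs <;> omega
  · have hGb : (G == 0) = false := by simp [hG0]
    simp only [hGb, Bool.false_eq_true, if_false]

-- ===== VERDICT (by name: the statement is the Claim_ definition above) =====
theorem count_equal_mod_values_spec : Claim_equal_count_equal_mod_values := by
  intro arr n _ hpre
  unfold Spec_count_equal_mod_values
  by_cases hn : n = 1
  · simp [count_equal_mod_values, count_equal_mod_values_alt, hn]
  · match arr with
    | [] => exact absurd hpre (by simp [Pre_count_equal_mod_values, hn])
    | a0 :: rest => exact pv_main_cons a0 n rest hn
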